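-- pv_equiv track=rewrite | github.com/edricding/edricd.com-python-fastapi | repo/backend/app/main.py | resolve_current_and_next_slot
-- ===== SOURCE A (Python) =====
-- WEEK_MINUTES = 7 * 24 * 60
--
-- def resolve_current_and_next_slot(
--     slots: list[dict],
--     weekday: int,
--     minute_of_day: int,
-- ) -> tuple[dict | None, dict | None, int | None]:
--     now_week_minute = (weekday - 1) * 1440 + minute_of_day
--     current_slot = None
--     next_slot = None
--     min_delta = None
--
--     for slot in slots:
--         if slot["weekday"] == weekday and slot["start_min"] <= minute_of_day < slot["end_min"]:
--             current_slot = slot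
--
--         slot_week_minute = (slot["weekday"] - 1) * 1440 + slot["start_min"]
--         delta = slot_week_minute - now_week_minute
--         if delta <= 0:
--             delta += WEEK_MINUTES
--         if min_delta is None or delta < min_delta:
--             min_delta = delta
--             next_slot = slot
--
--     return current_slot, next_slot, min_delta
-- ===== SOURCE B (Python) =====
-- WEEK_MINUTES = 7 * 24 * 60
--
-- def resolve_current_and_next_slot(
--     slots: list[dict],
--     weekday: int,
--     minute_of_day: int,
-- ) -> tuple[dict | None, dict | None, int | None]:
--     if not slots:
--         return (None, None, None)
--     now_week_minute = (weekday - 1) * 1440 + minute_of_day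
--
--     def delta(slot):
--         d = (slot["weekday"] - 1) * 1440 + slot["start_min"] - now_week_minute
--         return d + WEEK_MINUTES if d <= 0 else d
--
--     ordered = sorted(slots, key=delta)
--     next_slot = ordered[0]
--     matches = [s for s in slots
--                if s["weekday"] == weekday and s["start_min"] <= minute_of_day < s["end_min"]]
--     current_slot = matches[-1] if matches else None
--     return (current_slot, next_slot, delta(next_slot))
-- ===== Notes on version B (the rewrite author's own statement) =====
-- stated objective: alternative
-- what changed: A's single streaming loop threading three accumulators (current, next, min_delta) is replaced by a sort-based formulation: stable-sort the slots by wrapped delta and take the head as the next slot, filter the matching slots and take the last as the current slot, with an explicit empty-list guard.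
import Mathlib
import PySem

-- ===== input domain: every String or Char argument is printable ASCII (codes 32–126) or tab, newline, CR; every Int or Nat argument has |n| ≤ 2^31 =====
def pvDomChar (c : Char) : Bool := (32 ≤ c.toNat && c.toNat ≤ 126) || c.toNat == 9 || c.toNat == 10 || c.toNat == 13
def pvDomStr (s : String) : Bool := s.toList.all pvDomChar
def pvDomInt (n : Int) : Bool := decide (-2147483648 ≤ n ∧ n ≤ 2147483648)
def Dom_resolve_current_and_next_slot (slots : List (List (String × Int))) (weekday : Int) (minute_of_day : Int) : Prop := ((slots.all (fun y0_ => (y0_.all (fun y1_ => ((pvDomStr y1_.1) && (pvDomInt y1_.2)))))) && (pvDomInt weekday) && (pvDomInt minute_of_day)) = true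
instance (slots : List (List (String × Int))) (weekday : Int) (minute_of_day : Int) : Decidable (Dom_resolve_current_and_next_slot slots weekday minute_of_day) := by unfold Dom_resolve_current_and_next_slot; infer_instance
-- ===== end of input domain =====

-- B replaces A's single streaming loop with three accumulators by a sort-based formulation:
-- stable-sort the slots by wrapped delta and take the head as next slot, filter the matching
-- slots and take the last as current slot (objective: alternative algorithm; return value only).

def WEEK_MINUTES : Int := 7 * 24 * 60

-- slot["k"] under Pre_ (key present); PySem.Dict.getD is Python's first-match dict lookup
def slotGet (slot : List (String × Int)) (k : String) : Int :=
  PySem.Dict.getD (PySem.Dict.mk slot) k 0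

-- ===== PORT A =====
def resolve_current_and_next_slot (slots : List (List (String × Int))) (weekday : Int) (minute_of_day : Int) : (Option (List (String × Int))) × (Option (List (String × Int))) × Option Int :=
  let now_week_minute := (weekday - 1) * 1440 + minute_of_day
  slots.foldl
    (fun (acc : (Option (List (String × Int))) × (Option (List (String × Int))) × Option Int) slot =>
      let current_slot :=
        if slotGet slot "weekday" = weekday ∧ slotGet slot "start_min" ≤ minute_of_day ∧ minute_of_day < slotGet slot "end_min"
        then some slot else acc.1
      let slot_week_minute := (slotGet slot "weekday" - 1) * 1440 + slotGet slot "start_min"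
      let delta0 := slot_week_minute - now_week_minute
      let delta := if delta0 ≤ 0 then delta0 + WEEK_MINUTES else delta0
      match acc.2.2 with
      | none => (current_slot, some slot, some delta)
      | some min_delta =>
          if delta < min_delta then (current_slot, some slot, some delta)
          else (current_slot, acc.2.1, some min_delta))
    (none, none, none)

-- ===== PORT B =====
-- B-side helper: delta(slot)
def pvDelta (weekday minute_of_day : Int) (slot : List (String × Int)) : Int :=
  let d := (slotGet slot "weekday" - 1) * 1440 + slotGet slot "start_min" - ((weekday - 1) * 1440 + minute_of_day)
  if d ≤ 0 then d + WEEK_MINUTES else d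

-- B-side helper: the "current slot" membership test of the comprehension
def pvIsCur (weekday minute_of_day : Int) (s : List (String × Int)) : Bool :=
  decide (slotGet s "weekday" = weekday ∧ slotGet s "start_min" ≤ minute_of_day ∧ minute_of_day < slotGet s "end_min")

def resolve_current_and_next_slot_alt (slots : List (List (String × Int))) (weekday : Int) (minute_of_day : Int) : (Option (List (String × Int))) × (Option (List (String × Int))) × Option Int :=
  if slots = [] then (none, none, none)
  else
    let ordered := PySem.List.sorted slots (pvDelta weekday minute_of_day) false
    let next_slot := ordered.head?        -- ordered[0]; ordered is nonempty here, head? is the total reading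
    let matched := slots.filter (pvIsCur weekday minute_of_day)
    let current_slot := matched.getLast?  -- matches[-1] if matches else None
    (current_slot, next_slot, next_slot.map (pvDelta weekday minute_of_day))

-- ===== PRECONDITION & SPEC =====
-- Pre_ excludes slots on which Python A raises KeyError: a slot missing "weekday" or "start_min",
-- or missing "end_min" while its weekday equals weekday and its start_min ≤ minute_of_day
-- (only then does A's short-circuiting condition read "end_min").
def Pre_resolve_current_and_next_slot (slots : List (List (String × Int))) (weekday : Int) (minute_of_day : Int) : Prop :=
  slots.all (fun s => (PySem.Dict.mk s).contains "weekday" && (PySem.Dict.mk s).contains "start_min" &&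
    (!(decide (slotGet s "weekday" = weekday) && decide (slotGet s "start_min" ≤ minute_of_day)) || (PySem.Dict.mk s).contains "end_min")) = true
instance (slots : List (List (String × Int))) (weekday : Int) (minute_of_day : Int) : Decidable (Pre_resolve_current_and_next_slot slots weekday minute_of_day) := by unfold Pre_resolve_current_and_next_slot; infer_instance
def pvWitness_resolve_current_and_next_slot : (List (List (String × Int))) × Int × Int :=
  ([[("weekday", 1), ("start_min", 0), ("end_min", 60)], [("weekday", 3), ("start_min", 30), ("end_min", 90)]], 1, 30)

def Spec_resolve_current_and_next_slot (slots : List (List (String × Int))) (weekday : Int) (minute_of_day : Int) (out : (Option (List (String × Int))) × (Option (List (String × Int))) × Option Int) : Prop := out = resolve_current_and_next_slot_alt slots weekday minute_of_day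
instance (slots : List (List (String × Int))) (weekday : Int) (minute_of_day : Int) (out : (Option (List (String × Int))) × (Option (List (String × Int))) × Option Int) : Decidable (Spec_resolve_current_and_next_slot slots weekday minute_of_day out) := by unfold Spec_resolve_current_and_next_slot; infer_instance

-- ===== CLAIM (what is proved, stated in full; the proofs are below) =====
def Claim_equal_resolve_current_and_next_slot : Prop := ∀ (slots : List (List (String × Int))) (weekday : Int) (minute_of_day : Int), Dom_resolve_current_and_next_slot slots weekday minute_of_day → Pre_resolve_current_and_next_slot slots weekday minute_of_day → Spec_resolve_current_and_next_slot slots weekday minute_of_day (resolve_current_and_next_slot slots weekday minute_of_day)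

-- ===== LEMMAS AND PROOFS =====

-- A's loop body as a named function (definitionally the lambda inside the port of A)
def pvStepA (weekday minute_of_day : Int)
    (acc : (Option (List (String × Int))) × (Option (List (String × Int))) × Option Int)
    (slot : List (String × Int)) :
    (Option (List (String × Int))) × (Option (List (String × Int))) × Option Int :=
  let current_slot :=
    if slotGet slot "weekday" = weekday ∧ slotGet slot "start_min" ≤ minute_of_day ∧ minute_of_day < slotGet slot "end_min"
    then some slot else acc.1
  let slot_week_minute := (slotGet slot "weekday" - 1) * 1440 + slotGet slot "start_min"
  let delta0 := slot_week_minute - ((weekday - 1) * 1440 + minute_of_day)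
  let delta := if delta0 ≤ 0 then delta0 + WEEK_MINUTES else delta0
  match acc.2.2 with
  | none => (current_slot, some slot, some delta)
  | some min_delta =>
      if delta < min_delta then (current_slot, some slot, some delta)
      else (current_slot, acc.2.1, some min_delta)

-- the running-minimum step A's next/min_delta accumulators implement
def pvMinStep (weekday minute_of_day : Int)
    (acc : Option (List (String × Int))) (x : List (String × Int)) : Option (List (String × Int)) :=
  match acc with
  | none => some x
  | some m => if pvDelta weekday minute_of_day x < pvDelta weekday minute_of_day m then some x else some m

theorem A_eq_foldl (slots : List (List (String × Int))) (weekday minute_of_day : Int) :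
    resolve_current_and_next_slot slots weekday minute_of_day
      = slots.foldl (pvStepA weekday minute_of_day) (none, none, none) := rfl

theorem stepA_shape (weekday minute_of_day : Int) (c n : Option (List (String × Int)))
    (x : List (String × Int)) :
    pvStepA weekday minute_of_day (c, n, n.map (pvDelta weekday minute_of_day)) x
      = (if pvIsCur weekday minute_of_day x then some x else c,
         pvMinStep weekday minute_of_day n x,
         (pvMinStep weekday minute_of_day n x).map (pvDelta weekday minute_of_day)) := by
  cases n with
  | none =>
      show ((if slotGet x "weekday" = weekday ∧ slotGet x "start_min" ≤ minute_of_day ∧ minute_of_day < slotGet x "end_min" then some x else c),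
            some x, some (pvDelta weekday minute_of_day x)) = _
      simp only [pvMinStep, pvIsCur, decide_eq_true_eq]
      split_ifs <;> rfl
  | some mm =>
      show (if pvDelta weekday minute_of_day x < pvDelta weekday minute_of_day mm then
              ((if slotGet x "weekday" = weekday ∧ slotGet x "start_min" ≤ minute_of_day ∧ minute_of_day < slotGet x "end_min" then some x else c),
               some x, some (pvDelta weekday minute_of_day x))
            else
              ((if slotGet x "weekday" = weekday ∧ slotGet x "start_min" ≤ minute_of_day ∧ minute_of_day < slotGet x "end_min" then some x else c),
               some mm, some (pvDelta weekday minute_of_day mm))) = _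
      simp only [pvMinStep, pvIsCur, decide_eq_true_eq]
      split_ifs <;> rfl

-- A's fold, from a state whose min_delta component is the delta of its next_slot component,
-- computes the reversed-first-match current slot (falling back to the carried one) and a
-- running strict-minimum-by-delta continued from the carried next_slot.
theorem foldA_char (weekday minute_of_day : Int) (slots : List (List (String × Int)))
    (c n : Option (List (String × Int))) :
    slots.foldl (pvStepA weekday minute_of_day) (c, n, n.map (pvDelta weekday minute_of_day))
      = ((slots.reverse.find? (pvIsCur weekday minute_of_day)).or c,
         slots.foldl (pvMinStep weekday minute_of_day) n,
         (slots.foldl (pvMinStep weekday minute_of_day) n).map (pvDelta weekday minute_of_day)) := by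
  induction slots generalizing c n with
  | nil => simp
  | cons x t ih =>
    simp only [List.foldl_cons, stepA_shape, ih, List.reverse_cons, List.find?_append,
      List.find?_cons, List.find?_nil]
    cases hpx : pvIsCur weekday minute_of_day x <;> simp

-- head of a stable insertion: the new element comes first iff it is strictly before the old head
theorem head?_insertBy {α κ : Type} [LinearOrder κ] (key : α → κ) (x : α) (ys : List α) :
    (PySem.List.insertBy (fun a b => decide (key a < key b)) x ys).head?
      = match ys.head? with
        | none => some x
        | some h => if key x < key h then some x else some h := by
  cases ys with
  | nil => rfl
  | cons y t =>
      simp only [PySem.List.insertBy, List.head?_cons]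
      by_cases h : key x < key y <;> simp [h]

-- the head of the stable sort IS the running first-strict-minimum loop
theorem head?_sorted_eq_min (weekday minute_of_day : Int) (slots : List (List (String × Int))) :
    (PySem.List.sorted slots (pvDelta weekday minute_of_day) false).head?
      = slots.foldl (pvMinStep weekday minute_of_day) none := by
  rw [PySem.List.sorted_eq_foldl_insertBy]
  suffices h : ∀ (acc : List (List (String × Int))),
      (slots.foldl (fun acc x => PySem.List.insertBy
          (fun a b => decide (pvDelta weekday minute_of_day a < pvDelta weekday minute_of_day b)) x acc) acc).head?
        = slots.foldl (pvMinStep weekday minute_of_day) acc.head? from h []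
  induction slots with
  | nil => intro acc; rfl
  | cons x t ih =>
      intro acc
      simp only [List.foldl_cons, ih, head?_insertBy]
      cases acc <;> rfl

-- ===== VERDICT (by name: the statement is the Claim_ definition above) =====
theorem resolve_current_and_next_slot_spec : Claim_equal_resolve_current_and_next_slot := by
  intro slots weekday minute_of_day _ _
  unfold Spec_resolve_current_and_next_slot resolve_current_and_next_slot_alt
  rw [A_eq_foldl]
  rcases slots with _ | ⟨x, t⟩
  · simp
  · have h := foldA_char weekday minute_of_day (x :: t) none none
    simp only [Option.map_none] at h
    rw [h]
    simp only [if_neg (List.cons_ne_nil x t), head?_sorted_eq_min]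
    have hc : ((x :: t).filter (pvIsCur weekday minute_of_day)).getLast?
        = (x :: t).reverse.find? (pvIsCur weekday minute_of_day) := by
      rw [List.getLast?_eq_head?_reverse, ← List.filter_reverse, List.head?_filter]
    rw [hc]
    simp
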